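-- pv_equiv track=rewrite | github.com/ck4957/practice-leetcode | _699_1_tetris.py | solve
-- ===== SOURCE A (Python) =====
-- def solve(matrix):
--     ans, R, C = 0, len(matrix), len(matrix[0])
--     for col in range(C):
--         has_star_above = False
--         # Find the highest shape in the column
--         for row in range(R):
--             if matrix[row][col] == '*':
--                 has_star_above = True
--             elif matrix[row][col] == '#':
--                 if has_star_above:
--                     ans += 1
--     return ans
-- ===== SOURCE B (Python) =====
-- def solve(matrix):
--     ans = 0
--     C = len(matrix[0])
--     for col in range(C):
--         column = [row[col] for row in matrix]
--         if '*' in column: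
--             ans += column[column.index('*'):].count('#')
--     return ans
-- ===== Notes on version B (the rewrite author's own statement) =====
-- stated objective: alternative
-- what changed: Replaces A's stateful row-by-row flag scan of each column with a stateless per-column computation: build the column, locate the first '*' with list.index and count '#' in the slice after it.
import Mathlib
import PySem

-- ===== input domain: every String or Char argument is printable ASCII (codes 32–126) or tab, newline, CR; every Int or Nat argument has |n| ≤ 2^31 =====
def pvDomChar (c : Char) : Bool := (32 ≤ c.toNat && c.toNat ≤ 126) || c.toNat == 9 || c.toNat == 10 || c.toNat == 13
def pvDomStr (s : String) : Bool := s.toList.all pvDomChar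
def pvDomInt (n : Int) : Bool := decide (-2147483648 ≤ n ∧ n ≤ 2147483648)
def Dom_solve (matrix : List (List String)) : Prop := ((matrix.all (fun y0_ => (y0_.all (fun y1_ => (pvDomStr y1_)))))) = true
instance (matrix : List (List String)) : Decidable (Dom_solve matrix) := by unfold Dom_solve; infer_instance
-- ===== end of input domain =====

-- B replaces A's stateful has-star flag scan with a stateless per-column index/slice/count computation (same cost; alternative decomposition).

-- ===== PORT A =====
-- A's inner-loop body (the three branches in A's order), named so the lemmas can speak about it.
def stepA (p : Int × Bool) (cell : String) : Int × Bool :=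
  if cell = "*" then (p.1, true)
  else if cell = "#" then (if p.2 then (p.1 + 1, p.2) else p)
  else p

def solve (matrix : List (List String)) : Int :=
  let R := matrix.length
  let C := (matrix.getD 0 []).length
  (List.range C).foldl (fun ans col =>
    ((List.range R).foldl
        (fun p row => stepA p ((matrix.getD row []).getD col ""))
        (ans, false)).1) 0

-- ===== PORT B =====
def solve_alt (matrix : List (List String)) : Int :=
  let C := (matrix.getD 0 []).length
  (List.range C).foldl (fun ans col =>
    let column := matrix.map (fun row => row.getD col "")
    match PySem.List.index? column "*" with
    | none => ans
    | some i => ans + (PySem.List.count (PySem.List.slice column (some (i : Int)) none) "#" : Int)) 0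

-- ===== PRECONDITION & SPEC =====
-- Pre_ excludes exactly the inputs where the Python A raises IndexError: the empty matrix
-- (matrix[0]) and matrices with a row shorter than the first row (matrix[row][col]).
def Pre_solve (matrix : List (List String)) : Prop :=
  matrix ≠ [] ∧ ∀ row ∈ matrix, (matrix.getD 0 []).length ≤ row.length
instance (matrix : List (List String)) : Decidable (Pre_solve matrix) := by unfold Pre_solve; infer_instance
def pvWitness_solve : List (List String) := [["*", "."], ["#", "#"]]

def Spec_solve (matrix : List (List String)) (out : Int) : Prop := out = solve_alt matrix
instance (matrix : List (List String)) (out : Int) : Decidable (Spec_solve matrix out) := by unfold Spec_solve; infer_instance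

-- ===== CLAIM (what is proved, stated in full; the proofs are below) =====
def Claim_equal_solve : Prop := ∀ (matrix : List (List String)), Dom_solve matrix → Pre_solve matrix → Spec_solve matrix (solve matrix)

-- ===== LEMMAS AND PROOFS =====

lemma foldl_stepA_true (cells : List String) (a : Int) :
    (cells.foldl stepA (a, true)).1 = a + (cells.count "#" : Int) := by
  induction cells generalizing a with
  | nil => simp
  | cons c cs ih =>
    by_cases h : c = "*"
    · simp [h, stepA, List.foldl_cons, ih]
    · by_cases h2 : c = "#"
      · simp [h2, stepA, List.foldl_cons, ih]; ring
      · simp [h, h2, stepA, List.foldl_cons, ih]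

lemma foldl_stepA_false (cells : List String) (a : Int) :
    (cells.foldl stepA (a, false)).1 =
      match PySem.List.index? cells "*" with
      | none => a
      | some i => a + (PySem.List.count (PySem.List.slice cells (some (i : Int)) none) "#" : Int) := by
  induction cells generalizing a with
  | nil => simp [PySem.List.index?]
  | cons c cs ih =>
    by_cases h : c = "*"
    · subst h
      rw [PySem.List.index?_cons_self]
      have hs : PySem.List.slice ("*" :: cs) (some ((0 : Nat) : Int)) none = "*" :: cs :=
        PySem.List.slice_from_natCast _ 0
      have hstep : stepA (a, false) "*" = (a, true) := by simp [stepA]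
      rw [List.foldl_cons, hstep, foldl_stepA_true]
      push_cast [hs, PySem.List.count_eq, List.count_cons]
      simp
    · have hstep : stepA (a, false) c = (a, false) := by
        simp only [stepA, if_neg h]
        split <;> simp
      rw [List.foldl_cons, hstep, ih, PySem.List.index?_cons_of_ne cs h]
      cases hidx : PySem.List.index? cs "*" with
      | none => simp
      | some i =>
        have h1 : PySem.List.slice (c :: cs) (some ((i + 1 : Nat) : Int)) none = (c :: cs).drop (i + 1) :=
          PySem.List.slice_from_natCast _ _
        have h2 : PySem.List.slice cs (some ((i : Nat) : Int)) none = cs.drop i :=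
          PySem.List.slice_from_natCast _ _
        push_cast at h1
        simp [h1, h2]

lemma range_getD_eq_map (matrix : List (List String)) (col : Nat) :
    (List.range matrix.length).map (fun row => (matrix.getD row []).getD col "") =
      matrix.map (fun row => row.getD col "") := by
  induction matrix with
  | nil => simp
  | cons r rs ih =>
    rw [List.length_cons, List.range_succ_eq_map]
    simp only [List.map_cons, List.map_map, List.getD_cons_zero]
    simpa using ih

-- ===== VERDICT (by name: the statement is the Claim_ definition above) =====
theorem solve_spec : Claim_equal_solve := by
  intro matrix _ _
  unfold Spec_solve solve solve_alt
  simp only []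
  congr 1
  funext ans col
  calc ((List.range matrix.length).foldl
          (fun p row => stepA p ((matrix.getD row []).getD col "")) (ans, false)).1
      = (((List.range matrix.length).map (fun row => (matrix.getD row []).getD col "")).foldl
          stepA (ans, false)).1 := by rw [List.foldl_map]
    _ = ((matrix.map (fun row => row.getD col "")).foldl stepA (ans, false)).1 := by
          rw [range_getD_eq_map]
    _ = _ := by rw [foldl_stepA_false]
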